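-- pv_equiv track=rewrite | github.com/ocavue/leetcode | 282.expression-add-operators.py | split_seq
-- ===== SOURCE A (Python) =====
-- from typing import List, Generator
--
-- def is_valid_num(num: str) -> bool:
--     return len(num) >= 1 and (not num.startswith("0") or num == "0")
--
-- def split_seq(num: str) -> Generator[List[str], None, None]:
--     if is_valid_num(num):
--         yield [num]
--
--     for i in range(1, len(num)):
--         union, atom = num[0:i], num[i:]
--         if is_valid_num(atom):
--             for nums in split_seq(union):
--                 nums.append(atom)
--                 yield nums
-- ===== SOURCE B (Python) =====
-- def is_valid_num(num: str) -> bool: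
--     return len(num) >= 1 and (not num.startswith("0") or num == "0")
--
-- def split_seq(num: str):
--     n = len(num)
--     results = [[]]
--     for k in range(1, n + 1):
--         row = [[num[0:k]]] if is_valid_num(num[0:k]) else []
--         for i in range(1, k):
--             seg = num[i:k]
--             if is_valid_num(seg):
--                 row.extend(s + [seg] for s in results[i])
--         results.append(row)
--     yield from results[n]
-- ===== Notes on version B (the rewrite author's own statement) =====
-- stated objective: alternative
-- what changed: Replaced A's recomputing top-down recursion (split_seq(prefix) re-enumerated for every suffix cut) with a bottom-up dynamic-programming table results[k] of all splits of num[0:k], computing each prefix's splits once while preserving the exact yield order; total time is still dominated by the exponential output size.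
import Mathlib
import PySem

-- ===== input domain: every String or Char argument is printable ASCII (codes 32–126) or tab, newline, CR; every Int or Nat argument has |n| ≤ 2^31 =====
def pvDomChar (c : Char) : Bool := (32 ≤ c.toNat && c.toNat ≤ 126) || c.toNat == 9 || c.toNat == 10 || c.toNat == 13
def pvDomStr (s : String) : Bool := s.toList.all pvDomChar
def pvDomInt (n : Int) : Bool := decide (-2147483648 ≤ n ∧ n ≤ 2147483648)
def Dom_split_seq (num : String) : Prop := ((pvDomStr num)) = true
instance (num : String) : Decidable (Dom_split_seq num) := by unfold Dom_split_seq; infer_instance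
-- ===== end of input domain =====

-- B replaces A's recomputing recursion with a bottom-up table over prefix lengths (each
-- prefix's splits computed once), preserving the exact yield order (objective: alternative).
-- A and B are Python generators; equivalence is about the sequence of yielded lists.

-- ===== PORT A =====
-- is_valid_num: len(num) >= 1 and (not num.startswith("0") or num == "0");
-- num.startswith("0") ported as take 1 = ['0'] (exact: equal iff the string is nonempty with first char '0')
def pvIsValidNum (cs : List Char) : Bool :=
  decide (1 ≤ cs.length) && (!(decide (cs.take 1 = ['0'])) || decide (cs = ['0']))

-- A on the character list; slices num[0:i] / num[i:] with 0 ≤ i < len ported exactly as take i / drop i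
def splitA (cs : List Char) : List (List String) :=
  (if pvIsValidNum cs then [[String.ofList cs]] else []) ++
  (List.range' 1 (cs.length - 1)).attach.flatMap (fun x =>
    let union := cs.take x.1
    let atom := cs.drop x.1
    if pvIsValidNum atom then (splitA union).map (fun nums => nums ++ [String.ofList atom]) else [])
termination_by cs.length
decreasing_by
  have := List.mem_range'_1.mp x.2
  simp only [List.length_take]
  omega

def split_seq (num : String) : List (List String) := splitA num.toList

-- ===== PORT B =====
-- the body of B's outer loop: extend the table with row k (splits of num[0:k])
def stepB (cs : List Char) (results : List (List (List String))) (k : Nat) :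
    List (List (List String)) :=
  let row0 := if pvIsValidNum (cs.take k) then [[String.ofList (cs.take k)]] else []
  let row := (List.range' 1 (k - 1)).foldl (fun row i =>
      let seg := (cs.drop i).take (k - i)     -- num[i:k]
      if pvIsValidNum seg then row ++ (results.getD i []).map (fun s => s ++ [String.ofList seg])
      else row) row0
  results ++ [row]

-- bottom-up DP: results[k] = all splits of num[0:k]; indexing results[i] is always in range,
-- ported as getD i []
def splitB (cs : List Char) : List (List String) :=
  let n := cs.length
  let results := (List.range' 1 n).foldl (stepB cs) [([] : List (List String))]
  results.getD n []

def split_seq_alt (num : String) : List (List String) := splitB num.toList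

-- ===== PRECONDITION & SPEC =====
def Spec_split_seq (num : String) (out : List (List String)) : Prop := out = split_seq_alt num
instance (num : String) (out : List (List String)) : Decidable (Spec_split_seq num out) := by unfold Spec_split_seq; infer_instance

-- ===== CLAIM (what is proved, stated in full; the proofs are below) =====
def Claim_equal_split_seq : Prop := ∀ (num : String), Dom_split_seq num → Spec_split_seq num (split_seq num)

-- ===== LEMMAS AND PROOFS =====

theorem pvFlatMap_attach {α β : Type} (l : List α) (f : α → List β) :
    l.attach.flatMap (fun x => f x.1) = l.flatMap f := by
  conv_rhs => rw [← List.attach_map_subtype_val l]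
  rw [List.flatMap_map]

-- attach-free unfolding of splitA
theorem splitA_unfold (cs : List Char) :
    splitA cs = (if pvIsValidNum cs then [[String.ofList cs]] else []) ++
      (List.range' 1 (cs.length - 1)).flatMap (fun i =>
        if pvIsValidNum (cs.drop i) then
          (splitA (cs.take i)).map (fun nums => nums ++ [String.ofList (cs.drop i)])
        else []) := by
  rw [splitA.eq_def]
  congr 1
  exact pvFlatMap_attach (List.range' 1 (cs.length - 1)) (fun i =>
    if pvIsValidNum (cs.drop i) then
      (splitA (cs.take i)).map (fun nums => nums ++ [String.ofList (cs.drop i)])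
    else [])

theorem splitA_nil : splitA ([] : List Char) = [] := by
  rw [splitA_unfold]
  simp [pvIsValidNum]

-- row k of the table equals splitA on the length-k prefix
theorem stepB_row (cs : List Char) (k : Nat) (hk1 : 1 ≤ k) (hk : k ≤ cs.length)
    (results : List (List (List String)))
    (hres : ∀ i, i < k → results.getD i [] = splitA (cs.take i)) :
    stepB cs results k = results ++ [splitA (cs.take k)] := by
  have hlen : (cs.take k).length = k := by rw [List.length_take]; omega
  have h : ∀ (acc : List (List String)), ∀ i ∈ List.range' 1 (k - 1),
      (fun row i =>
        if pvIsValidNum (List.take (k - i) (List.drop i cs)) then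
          row ++ List.map (fun s => s ++ [String.ofList (List.take (k - i) (List.drop i cs))])
            (results.getD i [])
        else row) acc i =
      (fun row i => row ++
        (if pvIsValidNum ((cs.take k).drop i) then
          (splitA ((cs.take k).take i)).map (fun s => s ++ [String.ofList ((cs.take k).drop i)])
        else [])) acc i := by
    intro acc i hi
    have hmem := List.mem_range'_1.mp hi
    have hik : i < k := by omega
    simp only [List.drop_take, List.take_take, Nat.min_eq_left hik.le]
    rw [hres i hik]
    split_ifs <;> simp
  unfold stepB
  simp only []
  congr 1
  congr 1
  rw [PySem.List.foldl_congr_mem _ _ _ _ h, PySem.List.foldl_append_eq_flatMap,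
    splitA_unfold (cs.take k), hlen]

-- invariant of B's outer fold
theorem tableB (cs : List Char) (m : Nat) (hm : m ≤ cs.length) :
    ((List.range' 1 m).foldl (stepB cs) [([] : List (List String))]).length = m + 1 ∧
    ∀ j, j ≤ m →
      ((List.range' 1 m).foldl (stepB cs) [([] : List (List String))]).getD j [] =
        splitA (cs.take j) := by
  induction m with
  | zero =>
    refine ⟨rfl, ?_⟩
    intro j hj
    interval_cases j
    rw [List.take_zero, splitA_nil]
    rfl
  | succ m ih =>
    obtain ⟨hlen, hval⟩ := ih (by omega)
    rw [List.range'_concat, List.foldl_append, List.foldl_cons, List.foldl_nil]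
    have hk : 1 + 1 * m = m + 1 := by omega
    rw [hk, stepB_row cs (m + 1) (by omega) hm _ (fun i hik => hval i (by omega))]
    constructor
    · simp [hlen]
    · intro j hj
      by_cases hjm : j ≤ m
      · rw [List.getD_append _ _ _ j (by omega)]
        exact hval j hjm
      · have hj' : j = m + 1 := by omega
        subst hj'
        rw [List.getD_append_right _ _ _ _ (by omega), hlen]
        simp

theorem splitB_eq_splitA (cs : List Char) : splitB cs = splitA cs := by
  have h := (tableB cs cs.length le_rfl).2 cs.length le_rfl
  simpa [splitB, List.take_length] using h

-- ===== VERDICT (by name: the statement is the Claim_ definition above) =====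
theorem split_seq_spec : Claim_equal_split_seq := by
  intro num _
  unfold Spec_split_seq split_seq split_seq_alt
  exact (splitB_eq_splitA num.toList).symm
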